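-- pv_equiv track=rewrite | github.com/labbces/sra_llms | metrics.py | evaluate_response
-- ===== SOURCE A (Python) =====
-- def evaluate_response(model_response, ground_truth):
--     metrics = {
--         "TP": 0,
--         "FP": 0,
--         "FN": 0
--     }
--
--     #  Comparison of keys and values - Ground truth/Model response
--     for key in ground_truth:
--         if key in model_response:
--             if model_response[key] == ground_truth[key]:
--                 metrics["TP"] += 1  # True Positive
--             else:
--                 metrics["FP"] += 1  # False Positive
--         else:
--             metrics["FN"] += 1  # False Negative
--
--     for key in model_response:
--         if key not in ground_truth:
--             metrics["FP"] += 1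
--
--     return metrics
-- ===== SOURCE B (Python) =====
-- def evaluate_response(model_response, ground_truth):
--     common = ground_truth.keys() & model_response.keys()
--     tp = sum(1 for k in common if model_response[k] == ground_truth[k])
--     return {
--         "TP": tp,
--         "FP": len(model_response) - tp,
--         "FN": len(ground_truth) - len(common),
--     }
-- ===== Notes on version B (the rewrite author's own statement) =====
-- stated objective: simpler
-- what changed: Replaces A's two branch-incrementing loops with one key-set intersection: TP is counted over the shared keys, and FP/FN are recovered by arithmetic (FP = len(model_response) - TP, FN = len(ground_truth) - len(common)); the second loop over model_response disappears.
import Mathlib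
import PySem

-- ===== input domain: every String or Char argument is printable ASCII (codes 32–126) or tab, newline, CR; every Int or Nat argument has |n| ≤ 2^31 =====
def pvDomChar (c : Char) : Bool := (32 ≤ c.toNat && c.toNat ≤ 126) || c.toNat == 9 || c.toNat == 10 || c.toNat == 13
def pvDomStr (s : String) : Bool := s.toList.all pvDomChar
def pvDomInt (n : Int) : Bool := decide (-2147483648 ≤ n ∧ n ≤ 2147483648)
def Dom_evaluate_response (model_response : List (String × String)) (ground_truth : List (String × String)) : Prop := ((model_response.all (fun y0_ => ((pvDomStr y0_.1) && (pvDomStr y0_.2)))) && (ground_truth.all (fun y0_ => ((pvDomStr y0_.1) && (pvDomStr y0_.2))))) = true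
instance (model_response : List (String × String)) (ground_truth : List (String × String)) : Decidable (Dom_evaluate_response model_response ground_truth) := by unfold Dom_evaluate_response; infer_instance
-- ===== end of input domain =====

-- B replaces A's two branch-incrementing loops over the dicts with one key-set
-- intersection plus arithmetic (TP counted over the shared keys; FP, FN by subtraction) — simpler.


-- ===== PORT A =====
-- body of A's first loop: for key in ground_truth: if key in model_response: …
def evalStep1 (model_response : List (String × String)) (ground_truth : List (String × String))
    (m : PySem.Dict String Int) (key : String) : PySem.Dict String Int :=
  match (PySem.Dict.mk model_response).get? key with
  | some v =>
      if (PySem.Dict.mk ground_truth).get? key = some v then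
        m.modify "TP" 0 (· + 1)
      else
        m.modify "FP" 0 (· + 1)
  | none => m.modify "FN" 0 (· + 1)

-- body of A's second loop: for key in model_response: if key not in ground_truth: …
def evalStep2 (ground_truth : List (String × String))
    (m : PySem.Dict String Int) (key : String) : PySem.Dict String Int :=
  if (PySem.Dict.mk ground_truth).contains key then m
  else m.modify "FP" 0 (· + 1)

def evaluate_response (model_response : List (String × String)) (ground_truth : List (String × String)) : List (String × Int) :=
  let metrics : PySem.Dict String Int := PySem.Dict.mk [("TP", 0), ("FP", 0), ("FN", 0)]
  let metrics := (PySem.Dict.mk ground_truth).keys.foldl (evalStep1 model_response ground_truth) metrics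
  let metrics := (PySem.Dict.mk model_response).keys.foldl (evalStep2 ground_truth) metrics
  metrics.items

-- ===== PORT B =====
def evaluate_response_alt (model_response : List (String × String)) (ground_truth : List (String × String)) : List (String × Int) :=
  let common := (PySem.Dict.mk ground_truth).keys.filter
    (fun k => (PySem.Dict.mk model_response).contains k)
  let tp : Int := (common.filter
    (fun k => (PySem.Dict.mk model_response).get? k = (PySem.Dict.mk ground_truth).get? k)).length
  [("TP", tp),
   ("FP", ((PySem.Dict.mk model_response).size : Int) - tp),
   ("FN", ((PySem.Dict.mk ground_truth).size : Int) - (common.length : Int))]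

-- ===== PRECONDITION & SPEC =====
-- Pre_ excludes association lists with duplicate keys, which cannot arise from Python dicts
-- (both parameters are dicts in A; a Python dict's key list is duplicate-free by construction).
def Pre_evaluate_response (model_response : List (String × String)) (ground_truth : List (String × String)) : Prop :=
  (model_response.map Prod.fst).Nodup ∧ (ground_truth.map Prod.fst).Nodup
instance (model_response : List (String × String)) (ground_truth : List (String × String)) : Decidable (Pre_evaluate_response model_response ground_truth) := by unfold Pre_evaluate_response; infer_instance
def pvWitness_evaluate_response : (List (String × String)) × (List (String × String)) :=
  ([("a", "x"), ("c", "z")], [("a", "x"), ("b", "y")])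

def Spec_evaluate_response (model_response : List (String × String)) (ground_truth : List (String × String)) (out : List (String × Int)) : Prop := out = evaluate_response_alt model_response ground_truth
instance (model_response : List (String × String)) (ground_truth : List (String × String)) (out : List (String × Int)) : Decidable (Spec_evaluate_response model_response ground_truth out) := by unfold Spec_evaluate_response; infer_instance

-- ===== CLAIM (what is proved, stated in full; the proofs are below) =====
def Claim_equal_evaluate_response : Prop := ∀ (model_response : List (String × String)) (ground_truth : List (String × String)), Dom_evaluate_response model_response ground_truth → Pre_evaluate_response model_response ground_truth → Spec_evaluate_response model_response ground_truth (evaluate_response model_response ground_truth)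

-- ===== LEMMAS AND PROOFS =====

theorem modTP (a b c : Int) : (PySem.Dict.mk [("TP", a), ("FP", b), ("FN", c)]).modify "TP" 0 (· + 1) = PySem.Dict.mk [("TP", a + 1), ("FP", b), ("FN", c)] := by
  simp [PySem.Dict.modify, PySem.Dict.insert, PySem.Dict.getD, PySem.Dict.get?, PySem.Dict.contains]

theorem modFP (a b c : Int) : (PySem.Dict.mk [("TP", a), ("FP", b), ("FN", c)]).modify "FP" 0 (· + 1) = PySem.Dict.mk [("TP", a), ("FP", b + 1), ("FN", c)] := by
  simp [PySem.Dict.modify, PySem.Dict.insert, PySem.Dict.getD, PySem.Dict.get?, PySem.Dict.contains]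

theorem modFN (a b c : Int) : (PySem.Dict.mk [("TP", a), ("FP", b), ("FN", c)]).modify "FN" 0 (· + 1) = PySem.Dict.mk [("TP", a), ("FP", b), ("FN", c + 1)] := by
  simp [PySem.Dict.modify, PySem.Dict.insert, PySem.Dict.getD, PySem.Dict.get?, PySem.Dict.contains]

theorem loop1_counts (model_response ground_truth : List (String × String))
    (K : List String) (a b c : Int) :
    K.foldl (evalStep1 model_response ground_truth) (PySem.Dict.mk [("TP", a), ("FP", b), ("FN", c)]) =
      PySem.Dict.mk
        [("TP", a + K.countP (fun k => ((PySem.Dict.mk model_response).get? k).isSome &&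
            ((PySem.Dict.mk ground_truth).get? k == (PySem.Dict.mk model_response).get? k))),
         ("FP", b + K.countP (fun k => ((PySem.Dict.mk model_response).get? k).isSome &&
            !((PySem.Dict.mk ground_truth).get? k == (PySem.Dict.mk model_response).get? k))),
         ("FN", c + K.countP (fun k => !((PySem.Dict.mk model_response).get? k).isSome))] := by
  induction K generalizing a b c with
  | nil => simp
  | cons k K ih =>
    simp only [List.foldl_cons, List.countP_cons]
    rcases hm : (PySem.Dict.mk model_response).get? k with _ | v
    · simp only [evalStep1, hm, modFN, ih]
      simp
      ring
    · by_cases hv : (PySem.Dict.mk ground_truth).get? k = some v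
      · simp only [evalStep1, hm, if_pos hv, modTP, ih]
        simp [hv]
        ring
      · simp only [evalStep1, hm, if_neg hv, modFP, ih]
        simp [hv]
        ring

theorem loop2_counts (ground_truth : List (String × String))
    (L : List String) (a b c : Int) :
    L.foldl (evalStep2 ground_truth) (PySem.Dict.mk [("TP", a), ("FP", b), ("FN", c)]) =
      PySem.Dict.mk
        [("TP", a),
         ("FP", b + L.countP (fun k => !((PySem.Dict.mk ground_truth).contains k))),
         ("FN", c)] := by
  induction L generalizing b with
  | nil => simp
  | cons k L ih =>
    simp only [List.foldl_cons, List.countP_cons]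
    by_cases hc : (PySem.Dict.mk ground_truth).contains k
    · simp only [evalStep2, if_pos hc, ih]
      simp [hc]
    · simp only [evalStep2, if_neg hc, modFP, ih]
      simp [hc]
      ring

set_option maxRecDepth 8192 in
theorem evaluate_response_spec : Claim_equal_evaluate_response := by
  intro mr gt _ hpre
  unfold Spec_evaluate_response
  obtain ⟨hnm, hng⟩ := hpre
  simp only [evaluate_response, evaluate_response_alt]
  rw [loop1_counts, loop2_counts]
  simp only [PySem.Dict.keys, PySem.Dict.size, PySem.Dict.contains_eq_isSome_get?, zero_add]
  have hng' : (List.map (fun x : String × String => x.1) gt).Nodup := hng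
  have hnm' : (List.map (fun x : String × String => x.1) mr).Nodup := hnm
  -- notation
  have keyM : ∀ k, ((PySem.Dict.mk mr).get? k).isSome = decide (k ∈ List.map (fun x : String × String => x.1) mr) := by
    intro k
    rw [← PySem.Dict.contains_eq_isSome_get?, PySem.Dict.contains_eq_decide_mem_keys]
    rfl
  have keyG : ∀ k, ((PySem.Dict.mk gt).get? k).isSome = decide (k ∈ List.map (fun x : String × String => x.1) gt) := by
    intro k
    rw [← PySem.Dict.contains_eq_isSome_get?, PySem.Dict.contains_eq_decide_mem_keys]
    rfl
  -- TP: A's count over gt's keys is B's double filter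
  have hTP : List.countP (fun k => ((PySem.Dict.mk mr).get? k).isSome && ((PySem.Dict.mk gt).get? k == (PySem.Dict.mk mr).get? k)) (List.map (fun x : String × String => x.1) gt)
      = (List.filter (fun k => decide ((PySem.Dict.mk mr).get? k = (PySem.Dict.mk gt).get? k)) (List.filter (fun k => ((PySem.Dict.mk mr).get? k).isSome) (List.map (fun x : String × String => x.1) gt))).length := by
    rw [← List.countP_eq_length_filter, List.countP_filter]
    refine List.countP_congr ?_
    intro x _
    rcases h : (PySem.Dict.mk mr).get? x with _ | v
    · simp
    · by_cases he : (PySem.Dict.mk gt).get? x = some v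
      · simp [he]
      · simp [he, Ne.symm he]
  -- A's first-loop FP count is the not-equal part of the common keys
  have hFPa : List.countP (fun k => ((PySem.Dict.mk mr).get? k).isSome && !((PySem.Dict.mk gt).get? k == (PySem.Dict.mk mr).get? k)) (List.map (fun x : String × String => x.1) gt)
      = (List.filter (fun k => !decide ((PySem.Dict.mk mr).get? k = (PySem.Dict.mk gt).get? k)) (List.filter (fun k => ((PySem.Dict.mk mr).get? k).isSome) (List.map (fun x : String × String => x.1) gt))).length := by
    rw [← List.countP_eq_length_filter, List.countP_filter]
    refine List.countP_congr ?_
    intro x _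
    rcases h : (PySem.Dict.mk mr).get? x with _ | v
    · simp
    · by_cases he : (PySem.Dict.mk gt).get? x = some v
      · simp [he]
      · simp [he, Ne.symm he]
  -- the common keys split into the equal-value and not-equal-value parts
  have hsplit : (List.filter (fun k => ((PySem.Dict.mk mr).get? k).isSome) (List.map (fun x : String × String => x.1) gt)).length
      = (List.filter (fun k => decide ((PySem.Dict.mk mr).get? k = (PySem.Dict.mk gt).get? k)) (List.filter (fun k => ((PySem.Dict.mk mr).get? k).isSome) (List.map (fun x : String × String => x.1) gt))).length
        + (List.filter (fun k => !decide ((PySem.Dict.mk mr).get? k = (PySem.Dict.mk gt).get? k)) (List.filter (fun k => ((PySem.Dict.mk mr).get? k).isSome) (List.map (fun x : String × String => x.1) gt))).length :=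
    List.length_eq_length_filter_add _
  -- FN: the non-common part of gt's keys
  have hFN : (List.map (fun x : String × String => x.1) gt).length
      = (List.filter (fun k => ((PySem.Dict.mk mr).get? k).isSome) (List.map (fun x : String × String => x.1) gt)).length
        + List.countP (fun k => !((PySem.Dict.mk mr).get? k).isSome) (List.map (fun x : String × String => x.1) gt) := by
    rw [List.countP_eq_length_filter]
    exact List.length_eq_length_filter_add _
  -- second loop: mr's keys outside gt
  have hFPb : (List.map (fun x : String × String => x.1) mr).length
      = (List.filter (fun k => ((PySem.Dict.mk gt).get? k).isSome) (List.map (fun x : String × String => x.1) mr)).length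
        + List.countP (fun k => !((PySem.Dict.mk gt).get? k).isSome) (List.map (fun x : String × String => x.1) mr) := by
    rw [List.countP_eq_length_filter]
    exact List.length_eq_length_filter_add _
  -- symmetry of the key intersection (both key lists are duplicate-free)
  have hsym : (List.filter (fun k => ((PySem.Dict.mk mr).get? k).isSome) (List.map (fun x : String × String => x.1) gt)).length
      = (List.filter (fun k => ((PySem.Dict.mk gt).get? k).isSome) (List.map (fun x : String × String => x.1) mr)).length := by
    rw [List.filter_congr (fun x _ => keyM x), List.filter_congr (fun x _ => keyG x)]
    refine List.Perm.length_eq ?_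
    refine (List.perm_ext_iff_of_nodup (hng'.filter _) (hnm'.filter _)).2 ?_
    intro x
    simp only [List.mem_filter, decide_eq_true_eq]
    tauto
  have hGlen : (List.map (fun x : String × String => x.1) gt).length = gt.length := List.length_map _
  have hMlen : (List.map (fun x : String × String => x.1) mr).length = mr.length := List.length_map _
  simp only [List.cons.injEq, Prod.mk.injEq, and_true, true_and]
  refine ⟨?_, ?_, ?_⟩
  · omega
  · omega
  · omega

-- ===== VERDICT (by name: the statement is the Claim_ definition above) =====
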